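-- pv_equiv track=rewrite | github.com/Algorithm-ing/python_algorithm_2025 | Sunmin/4W/프로그래머스/모의고사.py | solution
-- ===== SOURCE A (Python) =====
-- def solution(answer):
--
--     ans = []
--     lists_1 = [1, 2, 3, 4, 5]
--     lists_2 = [2, 1, 2, 3, 2, 4, 2, 5]
--     lists_3 = [3, 3, 1, 1, 2, 2, 4, 4, 5, 5]
--
--     score = {1: 0, 2: 0, 3: 0}
--
--     for i in range(len(answer)):
--         if lists_1[i % len(lists_1)] == answer[i]:
--             score[1] += 1
--     for i in range(len(answer)):
--         if lists_2[i % len(lists_2)] == answer[i]: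
--             score[2] += 1
--     for i in range(len(answer)):
--         if lists_3[i % len(lists_3)] == answer[i]:
--             score[3] += 1
--
--     score = sorted(score.items(), key=lambda x: x[1], reverse=True)
--
--     for key, value in score:
--         if value == score[0][1]:
--             ans.append(key)
--
--     return ans
-- ===== SOURCE B (Python) =====
-- def solution(answer):
--     patterns = {1: [1, 2, 3, 4, 5],
--                 2: [2, 1, 2, 3, 2, 4, 2, 5],
--                 3: [3, 3, 1, 1, 2, 2, 4, 4, 5, 5]}
--     # Histogram of (index mod 40, value) pairs: 40 = lcm(5, 8, 10), so each
--     # supplicant's answer at index i depends only on i mod 40.  The main loop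
--     # never touches the patterns; each score is then 40 histogram lookups.
--     hist = {}
--     for i, a in enumerate(answer):
--         k = (i % 40, a)
--         hist[k] = hist.get(k, 0) + 1
--     scores = [(num, sum(hist.get((r, p[r % len(p)]), 0) for r in range(40)))
--               for num, p in patterns.items()]
--     m = max(s for _, s in scores)
--     return [num for num, s in scores if s == m]
-- ===== Notes on version B (the rewrite author's own statement) =====
-- stated objective: alternative
-- what changed: B builds a histogram keyed by (index mod 40, value) in one pass (40 = lcm of the pattern periods), so the match test against the patterns disappears from the loop over answer; each score is then 40 dictionary lookups, and the result is max-then-filter instead of A's three pattern scans plus a sort of the score dict.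
import Mathlib
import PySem

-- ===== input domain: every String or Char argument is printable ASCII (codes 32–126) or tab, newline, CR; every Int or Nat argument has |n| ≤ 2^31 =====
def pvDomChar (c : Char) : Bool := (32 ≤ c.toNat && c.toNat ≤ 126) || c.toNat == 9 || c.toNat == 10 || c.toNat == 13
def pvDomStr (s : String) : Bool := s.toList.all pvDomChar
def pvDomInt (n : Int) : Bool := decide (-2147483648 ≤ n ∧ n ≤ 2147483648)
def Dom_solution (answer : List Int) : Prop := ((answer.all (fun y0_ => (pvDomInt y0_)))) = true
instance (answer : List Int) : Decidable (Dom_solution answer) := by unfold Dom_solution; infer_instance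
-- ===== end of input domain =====

-- B replaces A's three pattern scans plus a value sort by a histogram keyed by
-- (index mod 40, value) built in one pass, 40 lookups per candidate, and a
-- max-then-filter (objective: alternative).

-- ===== PORT A =====
-- Indexing is ported with pyGetD (default 0): every index A uses is in range
-- (i ∈ range(len(answer)), i % len(pattern), and the sorted score list always has 3 items),
-- so the default is never read and the port is exact.
def solution (answer : List Int) : List Int :=
  let ans : List Int := []
  let lists1 : List Int := [1, 2, 3, 4, 5]
  let lists2 : List Int := [2, 1, 2, 3, 2, 4, 2, 5]
  let lists3 : List Int := [3, 3, 1, 1, 2, 2, 4, 4, 5, 5]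
  let score : PySem.Dict Int Int := PySem.Dict.ofList [(1, 0), (2, 0), (3, 0)]
  let score := (PySem.List.pyRange 0 (answer.length : Int) 1).foldl
    (fun d i =>
      if PySem.List.pyGetD lists1 (PySem.Int.mod i (lists1.length : Int)) 0
           == PySem.List.pyGetD answer i 0
      then PySem.Dict.modify d 1 0 (· + 1) else d) score
  let score := (PySem.List.pyRange 0 (answer.length : Int) 1).foldl
    (fun d i =>
      if PySem.List.pyGetD lists2 (PySem.Int.mod i (lists2.length : Int)) 0
           == PySem.List.pyGetD answer i 0
      then PySem.Dict.modify d 2 0 (· + 1) else d) score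
  let score := (PySem.List.pyRange 0 (answer.length : Int) 1).foldl
    (fun d i =>
      if PySem.List.pyGetD lists3 (PySem.Int.mod i (lists3.length : Int)) 0
           == PySem.List.pyGetD answer i 0
      then PySem.Dict.modify d 3 0 (· + 1) else d) score
  let scoreL := PySem.List.sorted score.items (fun x => x.2) true
  scoreL.foldl
    (fun ans kv =>
      if kv.2 == (PySem.List.pyGetD scoreL 0 ((0 : Int), (0 : Int))).2
      then ans ++ [kv.1] else ans) ans

-- ===== PORT B =====
-- Python's sum(... for r in range(40)) is ported as List.sum over the mapped range,
-- and max over the three scores as nested binary max (same value).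
def solution_alt (answer : List Int) : List Int :=
  let p1 : List Int := [1, 2, 3, 4, 5]
  let p2 : List Int := [2, 1, 2, 3, 2, 4, 2, 5]
  let p3 : List Int := [3, 3, 1, 1, 2, 2, 4, 4, 5, 5]
  let hist : PySem.Dict (Int × Int) Int :=
    (PySem.List.enumerate answer 0).foldl
      (fun d q => d.insert (PySem.Int.mod q.1 40, q.2)
        (d.getD (PySem.Int.mod q.1 40, q.2) 0 + 1))
      (PySem.Dict.mk [])
  let scoreOf : List Int → Int := fun p =>
    ((PySem.List.pyRange 0 40 1).map
      (fun r => hist.getD (r, PySem.List.pyGetD p (PySem.Int.mod r (p.length : Int)) 0) 0)).sum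
  let scores : List (Int × Int) := [(1, scoreOf p1), (2, scoreOf p2), (3, scoreOf p3)]
  let m := max (max (scoreOf p1) (scoreOf p2)) (scoreOf p3)
  (scores.filter (fun kv => kv.2 == m)).map (·.1)

-- ===== PRECONDITION & SPEC =====
def Spec_solution (answer : List Int) (out : List Int) : Prop := out = solution_alt answer
instance (answer : List Int) (out : List Int) : Decidable (Spec_solution answer out) := by unfold Spec_solution; infer_instance

-- ===== CLAIM (what is proved, stated in full; the proofs are below) =====
def Claim_equal_solution : Prop := ∀ (answer : List Int), Dom_solution answer → Spec_solution answer (solution answer)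

-- ===== LEMMAS AND PROOFS =====

-- the per-candidate hit count both programs compute
def cnt (answer pat : List Int) (L : Int) : Int :=
  (((PySem.List.pyRange 0 (answer.length : Int) 1).countP
    (fun i => PySem.List.pyGetD pat (PySem.Int.mod i L) 0 == PySem.List.pyGetD answer i 0) : Nat) : Int)

-- A's tail (sort the three scored items by value, descending, keep the top-valued keys)
def atail (a b c : Int) : List Int :=
  let scoreL := PySem.List.sorted [((1 : Int), a), (2, b), (3, c)] (fun x => x.2) true
  scoreL.foldl
    (fun ans kv =>
      if kv.2 == (PySem.List.pyGetD scoreL 0 ((0 : Int), (0 : Int))).2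
      then ans ++ [kv.1] else ans) []

-- B's tail (max of the three scores, filter in 1,2,3 order)
def btail (a b c : Int) : List Int :=
  let m := max (max a b) c
  ([((1 : Int), a), (2, b), (3, c)].filter (fun kv => kv.2 == m)).map (·.1)

theorem insertBy_nil {α : Type} (before : α → α → Bool) (x : α) :
    PySem.List.insertBy before x [] = [x] := rfl

theorem insertBy_cons {α : Type} (before : α → α → Bool) (x y : α) (ys : List α) :
    PySem.List.insertBy before x (y :: ys) =
      if before x y then x :: y :: ys else y :: PySem.List.insertBy before x ys := rfl

theorem modify1 (x y z : Int) :
    PySem.Dict.modify (PySem.Dict.mk [((1 : Int), x), (2, y), (3, z)]) 1 0 (· + 1) =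
      PySem.Dict.mk [(1, x + 1), (2, y), (3, z)] := rfl

theorem modify2 (x y z : Int) :
    PySem.Dict.modify (PySem.Dict.mk [((1 : Int), x), (2, y), (3, z)]) 2 0 (· + 1) =
      PySem.Dict.mk [(1, x), (2, y + 1), (3, z)] := rfl

theorem modify3 (x y z : Int) :
    PySem.Dict.modify (PySem.Dict.mk [((1 : Int), x), (2, y), (3, z)]) 3 0 (· + 1) =
      PySem.Dict.mk [(1, x), (2, y), (3, z + 1)] := rfl

theorem foldl_mod1 {γ : Type} (l : List γ) (x y z : Int) :
    l.foldl (fun d _ => PySem.Dict.modify d 1 0 (· + 1))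
        (PySem.Dict.mk [((1 : Int), x), (2, y), (3, z)]) =
      PySem.Dict.mk [(1, x + l.length), (2, y), (3, z)] := by
  induction l generalizing x with
  | nil => simp
  | cons h t ih =>
    rw [List.foldl_cons, modify1, ih]
    simp [List.length_cons, add_comm, add_left_comm]

theorem foldl_mod2 {γ : Type} (l : List γ) (x y z : Int) :
    l.foldl (fun d _ => PySem.Dict.modify d 2 0 (· + 1))
        (PySem.Dict.mk [((1 : Int), x), (2, y), (3, z)]) =
      PySem.Dict.mk [(1, x), (2, y + l.length), (3, z)] := by
  induction l generalizing y with
  | nil => simp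
  | cons h t ih =>
    rw [List.foldl_cons, modify2, ih]
    simp [List.length_cons, add_comm, add_left_comm]

theorem foldl_mod3 {γ : Type} (l : List γ) (x y z : Int) :
    l.foldl (fun d _ => PySem.Dict.modify d 3 0 (· + 1))
        (PySem.Dict.mk [((1 : Int), x), (2, y), (3, z)]) =
      PySem.Dict.mk [(1, x), (2, y), (3, z + l.length)] := by
  induction l generalizing z with
  | nil => simp
  | cons h t ih =>
    rw [List.foldl_cons, modify3, ih]
    simp [List.length_cons, add_comm, add_left_comm]

-- a sum of point-indicators over a Nodup list hitting q.1 once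
theorem sum_ite_zero (R : List Int) (f : Int → Int) (q : Int × Int) (hq : q.1 ∉ R) :
    (R.map (fun r => if (r, f r) == q then (1 : Int) else 0)).sum = 0 := by
  induction R with
  | nil => simp
  | cons r R ih =>
    simp only [List.map_cons, List.sum_cons, List.mem_cons, not_or] at *
    rw [ih hq.2]
    have : ((r, f r) == q) = false := by
      simp only [beq_iff_eq, Bool.eq_false_iff, ne_eq]
      intro h; exact hq.1 (by rw [← h])
    simp [this]

theorem sum_ite_single (R : List Int) (hR : R.Nodup) (f : Int → Int) (q : Int × Int)
    (hq : q.1 ∈ R) :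
    (R.map (fun r => if (r, f r) == q then (1 : Int) else 0)).sum =
      if f q.1 == q.2 then 1 else 0 := by
  induction R with
  | nil => simp at hq
  | cons r R ih =>
    simp only [List.map_cons, List.sum_cons]
    rcases List.mem_cons.1 hq with h | h
    · subst h
      rw [sum_ite_zero R f q (List.nodup_cons.1 hR).1, add_zero]
      by_cases hv : f q.1 = q.2
      · simp [hv]
      · simp [hv, Prod.ext_iff, Ne.symm]
    · rw [ih (List.nodup_cons.1 hR).2 h]
      have hr : q.1 ≠ r := by
        intro e; exact (List.nodup_cons.1 hR).1 (e ▸ h)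
      have : ((r, f r) == q) = false := by
        simp only [beq_iff_eq, Bool.eq_false_iff, ne_eq]
        intro e; exact hr (by rw [← e])
      simp [this]

-- partition: summing histogram counts over all residues gives the match count
theorem sum_count_partition (R : List Int) (hR : R.Nodup) (f : Int → Int)
    (K : List (Int × Int)) (hK : ∀ q ∈ K, q.1 ∈ R) :
    (R.map (fun r => ((K.count (r, f r) : Nat) : Int))).sum =
      ((K.countP (fun q => f q.1 == q.2) : Nat) : Int) := by
  induction K with
  | nil => simp
  | cons q K ih =>
    have hKs : ∀ p ∈ K, p.1 ∈ R := fun p hp => hK p (List.mem_cons_of_mem _ hp)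
    have step : (R.map (fun r => ((((q :: K).count (r, f r)) : Nat) : Int))).sum =
        (R.map (fun r => ((K.count (r, f r) : Nat) : Int))).sum +
          (R.map (fun r => if (r, f r) == q then (1 : Int) else 0)).sum := by
      rw [← PySem.List.sum_map_add_int]
      congr 1
      refine List.map_congr_left fun r hr => ?_
      by_cases h : ((r, f r) == q) = true
      · have h' : (q == (r, f r)) = true := by
          simp only [beq_iff_eq] at h ⊢; exact h.symm
        simp [List.count_cons, h, h']
      · have h' : (q == (r, f r)) = false := by
          simp only [beq_iff_eq, beq_eq_false_iff_ne, ne_eq] at h ⊢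
          exact fun e => h e.symm
        simp [List.count_cons, h, h']
    rw [step, ih hKs, sum_ite_single R hR f q (hK q (List.mem_cons_self)),
      List.countP_cons]
    by_cases h : (f q.1 == q.2) <;> simp [h]

-- B's histogram score equals the direct match count
theorem hist_getD (answer : List Int) (k : Int × Int) :
    ((PySem.List.enumerate answer 0).foldl
      (fun d q => d.insert (PySem.Int.mod q.1 40, q.2)
        (d.getD (PySem.Int.mod q.1 40, q.2) 0 + 1))
      (PySem.Dict.mk [])).getD k 0 =
      ((((PySem.List.enumerate answer 0).map (fun q => (PySem.Int.mod q.1 40, q.2))).count k : Nat) : Int) := by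
  rw [← List.foldl_map (f := fun q : Int × Int => (PySem.Int.mod q.1 40, q.2))
    (g := fun (d : PySem.Dict (Int × Int) Int) k => d.insert k (d.getD k 0 + 1))]
  rw [PySem.Dict.getD_foldl_insert_add_one]
  have h0 : (PySem.Dict.mk ([] : List ((Int × Int) × Int))).getD k 0 = 0 := rfl
  rw [h0, zero_add]

theorem score_eq (answer p : List Int) (hL : (p.length : Int) ∣ 40) (hp : 0 < p.length) :
    ((PySem.List.pyRange 0 40 1).map
      (fun r =>
        (((PySem.List.enumerate answer 0).foldl
          (fun d q => d.insert (PySem.Int.mod q.1 40, q.2)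
            (d.getD (PySem.Int.mod q.1 40, q.2) 0 + 1))
          (PySem.Dict.mk [])).getD
            (r, PySem.List.pyGetD p (PySem.Int.mod r (p.length : Int)) 0) 0))).sum =
      cnt answer p (p.length : Int) := by
  simp only [hist_getD]
  rw [sum_count_partition (PySem.List.pyRange 0 40 1) (by decide)
      (fun r => PySem.List.pyGetD p (PySem.Int.mod r (p.length : Int)) 0)
      (((PySem.List.enumerate answer 0).map (fun q => (PySem.Int.mod q.1 40, q.2))))
      (by
        intro q hq
        rcases List.mem_map.1 hq with ⟨q', hq', rfl⟩
        exact PySem.List.mem_pyRange_one.2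
          ⟨PySem.Int.mod_nonneg (a := q'.1) (by norm_num),
           PySem.Int.mod_lt (a := q'.1) (by norm_num)⟩)]
  rw [List.countP_map]
  rw [PySem.List.enumerate_eq_map_pyRange (d := 0), List.countP_map]
  unfold cnt
  congr 1
  apply List.countP_congr
  intro i hi
  have h40 : PySem.Int.mod (i % 40) (p.length : Int) = PySem.Int.mod i (p.length : Int) := by
    rw [PySem.Int.mod_eq_emod_of_pos (by exact_mod_cast hp),
        PySem.Int.mod_eq_emod_of_pos (by exact_mod_cast hp),
        Int.emod_emod_of_dvd _ hL]
  simp [Function.comp, h40]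

set_option maxHeartbeats 1000000 in
theorem tail_eq (a b c : Int) : atail a b c = btail a b c := by
  unfold atail btail
  rw [PySem.List.sorted_rev_eq_foldl_insertBy]
  by_cases h1 : a < b <;> by_cases h2 : a < c <;> by_cases h3 : b < c <;>
    simp [insertBy_cons, insertBy_nil, h1, h2, h3, PySem.List.pyGetD_zero_cons, max_def] <;>
    split_ifs <;> first | rfl | (exfalso; omega) | omega | simp_all

theorem solA (answer : List Int) :
    solution answer =
      atail (cnt answer [1, 2, 3, 4, 5] 5) (cnt answer [2, 1, 2, 3, 2, 4, 2, 5] 8)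
        (cnt answer [3, 3, 1, 1, 2, 2, 4, 4, 5, 5] 10) := by
  have h0 : (PySem.Dict.ofList [((1 : Int), (0 : Int)), (2, 0), (3, 0)]) =
      PySem.Dict.mk [((1 : Int), (0 : Int)), (2, 0), (3, 0)] := rfl
  simp only [solution, h0]
  rw [PySem.List.foldl_if_eq_foldl_filter
        (f := fun d (_ : Int) => PySem.Dict.modify d 1 0 (· + 1)), foldl_mod1,
    PySem.List.foldl_if_eq_foldl_filter
        (f := fun d (_ : Int) => PySem.Dict.modify d 2 0 (· + 1)), foldl_mod2,
    PySem.List.foldl_if_eq_foldl_filter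
        (f := fun d (_ : Int) => PySem.Dict.modify d 3 0 (· + 1)), foldl_mod3]
  simp only [← List.countP_eq_length_filter]
  norm_num [atail, cnt, PySem.Dict.items]

theorem solB (answer : List Int) :
    solution_alt answer =
      btail (cnt answer [1, 2, 3, 4, 5] 5) (cnt answer [2, 1, 2, 3, 2, 4, 2, 5] 8)
        (cnt answer [3, 3, 1, 1, 2, 2, 4, 4, 5, 5] 10) := by
  simp only [solution_alt]
  rw [score_eq answer [1, 2, 3, 4, 5] (by norm_num) (by norm_num),
    score_eq answer [2, 1, 2, 3, 2, 4, 2, 5] (by norm_num) (by norm_num),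
    score_eq answer [3, 3, 1, 1, 2, 2, 4, 4, 5, 5] (by norm_num) (by norm_num)]
  rfl

-- ===== VERDICT (by name: the statement is the Claim_ definition above) =====
theorem solution_spec : Claim_equal_solution := by
  intro answer _
  unfold Spec_solution
  rw [solA, solB, tail_eq]
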